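-- pv_equiv track=rewrite | github.com/allc/advent-of-code-2018 | day2.py | solution
-- ===== SOURCE A (Python) =====
-- def solution(ls):
--     two = 0
--     three = 0
--     for l in ls:
--         cs = dict()
--         for c in l:
--             if c in cs:
--                 cs[c] += 1
--             else:
--                 cs[c] = 1
--         for _, v in cs.items():
--             if v == 2:
--                 two += 1
--                 break
--         for _, v in cs.items():
--             if v == 3:
--                 three += 1
--                 break
--
--     return two * three
-- ===== SOURCE B (Python) =====
-- def solution(ls):
--     def has_rep(l, k):
--         return any(sum(1 for d in l if d == c) == k for c in l)
--     two = sum(1 for l in ls if has_rep(l, 2))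
--     three = sum(1 for l in ls if has_rep(l, 3))
--     return two * three
-- ===== Notes on version B (the rewrite author's own statement) =====
-- stated objective: simpler
-- what changed: Replaces the single pass that builds a per-string frequency dict and break-scans its values twice by two direct counting passes over the list, each testing per string whether some character's occurrence count equals 2 (resp. 3) with no auxiliary dictionary.
import Mathlib
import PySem

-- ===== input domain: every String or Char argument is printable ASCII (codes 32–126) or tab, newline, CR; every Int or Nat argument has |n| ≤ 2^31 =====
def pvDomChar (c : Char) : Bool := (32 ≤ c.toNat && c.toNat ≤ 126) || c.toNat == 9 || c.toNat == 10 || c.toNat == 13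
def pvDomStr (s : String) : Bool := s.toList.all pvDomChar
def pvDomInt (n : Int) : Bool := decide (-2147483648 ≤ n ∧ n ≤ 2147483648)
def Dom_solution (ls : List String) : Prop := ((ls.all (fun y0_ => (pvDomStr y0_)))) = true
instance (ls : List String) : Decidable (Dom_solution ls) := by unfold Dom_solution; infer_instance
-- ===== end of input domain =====

-- B replaces A's per-string frequency dict and break-scans by two direct counting
-- passes, testing per string whether some character occurs exactly 2 (resp. 3) times.

-- ===== PORT A =====
def solution (ls : List String) : Int :=
  let st := ls.foldl (fun (st : Int × Int) l =>
    -- cs = dict(); for c in l: if c in cs: cs[c] += 1 else cs[c] = 1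
    let cs := l.toList.foldl (fun (d : PySem.Dict Char Int) c =>
      if d.contains c then d.insert c (d.getD c 0 + 1) else d.insert c 1) PySem.Dict.empty
    -- for _, v in cs.items(): if v == 2: two += 1; break
    let two := if cs.items.any (fun p => p.2 == (2 : Int)) then st.1 + 1 else st.1
    let three := if cs.items.any (fun p => p.2 == (3 : Int)) then st.2 + 1 else st.2
    (two, three)) ((0 : Int), (0 : Int))
  st.1 * st.2

-- ===== PORT B =====
-- has_rep(l, k) = any(sum(1 for d in l if d == c) == k for c in l)
def hasRep (l : String) (k : Int) : Bool :=
  l.toList.any (fun c => ((l.toList.countP (fun d => d == c) : Int) == k))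

def solution_alt (ls : List String) : Int :=
  let two : Int := (ls.countP (fun l => hasRep l 2) : Int)
  let three : Int := (ls.countP (fun l => hasRep l 3) : Int)
  two * three

-- ===== PRECONDITION & SPEC =====
def Spec_solution (ls : List String) (out : Int) : Prop := out = solution_alt ls
instance (ls : List String) (out : Int) : Decidable (Spec_solution ls out) := by unfold Spec_solution; infer_instance

-- ===== CLAIM (what is proved, stated in full; the proofs are below) =====
def Claim_equal_solution : Prop := ∀ (ls : List String), Dom_solution ls → Spec_solution ls (solution ls)

-- ===== LEMMAS AND PROOFS =====

-- A's per-string dict loop builds exactly Counter(l)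
theorem dict_loop_eq_counter (xs : List Char) :
    xs.foldl (fun (d : PySem.Dict Char Int) c =>
      if d.contains c then d.insert c (d.getD c 0 + 1) else d.insert c 1) PySem.Dict.empty
    = PySem.Dict.counter xs := by
  rw [← PySem.Dict.foldl_insert_getD_add_one_eq_counter]
  apply PySem.List.foldl_congr_mem
  intro d c _
  by_cases h : d.contains c = true
  · simp [h]
  · simp only [Bool.not_eq_true] at h
    simp [h, PySem.Dict.getD_of_not_contains]

-- the break-scan over Counter(l).items equals B's direct any-count test
theorem any_items_counter_eq_hasRep (l : String) (k : Int) :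
    ((PySem.Dict.counter l.toList).items.any (fun p => p.2 == k)) = hasRep l k := by
  rw [PySem.Dict.items_counter, List.any_map]
  rw [Bool.eq_iff_iff]
  simp only [List.any_eq_true, PySem.Set.mem_ofList, Function.comp, hasRep, List.count]

theorem main_loop (ls : List String) : ∀ (a b : Int),
    ls.foldl (fun (st : Int × Int) l =>
      let cs := l.toList.foldl (fun (d : PySem.Dict Char Int) c =>
        if d.contains c then d.insert c (d.getD c 0 + 1) else d.insert c 1) PySem.Dict.empty
      let two := if cs.items.any (fun p => p.2 == (2 : Int)) then st.1 + 1 else st.1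
      let three := if cs.items.any (fun p => p.2 == (3 : Int)) then st.2 + 1 else st.2
      (two, three)) (a, b)
    = (a + (ls.countP (fun l => hasRep l 2) : Int), b + (ls.countP (fun l => hasRep l 3) : Int)) := by
  induction ls with
  | nil => intro a b; simp
  | cons l ls ih =>
    intro a b
    simp only [List.foldl_cons, List.countP_cons]
    rw [dict_loop_eq_counter, any_items_counter_eq_hasRep, any_items_counter_eq_hasRep, ih]
    by_cases h2 : hasRep l 2 <;> by_cases h3 : hasRep l 3 <;>
      simp [h2, h3, Prod.ext_iff] <;> omega

-- ===== VERDICT (by name: the statement is the Claim_ definition above) =====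
theorem solution_spec : Claim_equal_solution := by
  intro ls _
  show solution ls = solution_alt ls
  unfold solution solution_alt
  simp only
  rw [main_loop ls 0 0]
  simp
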